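-- pv_equiv track=rewrite | github.com/Sarthakm811/Agents | src/agents/swarm.py | _parse_hypotheses
-- ===== SOURCE A (Python) =====
-- from typing import Any, Callable, Dict, List, Optional
--
-- def _parse_hypotheses(content: str) -> List[Dict[str, str]]:
--     hypotheses = []
--     current_hypothesis = {}
--     current_text = []
--     for line in content.split("\n"):
--         stripped = line.strip()
--         if stripped and (stripped.lower().startswith("hypothesis") or (stripped[0].isdigit() and ":" in stripped[:10])):
--             if current_text:
--                 current_hypothesis["description"] = " ".join(current_text)
--                 if current_hypothesis.get("title"):
--                     hypotheses.append(current_hypothesis)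
--             current_hypothesis = {"title": stripped}
--             current_text = []
--         elif stripped:
--             current_text.append(stripped)
--     if current_text:
--         current_hypothesis["description"] = " ".join(current_text)
--         if current_hypothesis.get("title"):
--             hypotheses.append(current_hypothesis)
--     return hypotheses if hypotheses else [{"title": "Research Hypothesis", "description": content.strip()}]
-- ===== SOURCE B (Python) =====
-- from typing import Dict, List
--
-- def _is_header(s: str) -> bool:
--     return s.lower().startswith("hypothesis") or (s[0].isdigit() and ":" in s[:10])
--
-- def _parse_hypotheses(content: str) -> List[Dict[str, str]]:
--     lines = [s for s in (ln.strip() for ln in content.split("\n")) if s]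
--     idxs = [i for i, s in enumerate(lines) if _is_header(s)]
--     result = [{"title": lines[i], "description": " ".join(lines[i + 1:j])}
--               for i, j in zip(idxs, idxs[1:] + [len(lines)]) if j > i + 1]
--     return result or [{"title": "Research Hypothesis", "description": content.strip()}]
-- ===== Notes on version B (the rewrite author's own statement) =====
-- stated objective: alternative
-- what changed: A runs a stateful line-by-line accumulator machine (current dict + current text, flushed at each header); B has no running state: it strips/filters the lines, computes the list of header positions with enumerate, zips consecutive positions into (start, end) bounds and renders each bound by list slicing in a comprehension.
import Mathlib
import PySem

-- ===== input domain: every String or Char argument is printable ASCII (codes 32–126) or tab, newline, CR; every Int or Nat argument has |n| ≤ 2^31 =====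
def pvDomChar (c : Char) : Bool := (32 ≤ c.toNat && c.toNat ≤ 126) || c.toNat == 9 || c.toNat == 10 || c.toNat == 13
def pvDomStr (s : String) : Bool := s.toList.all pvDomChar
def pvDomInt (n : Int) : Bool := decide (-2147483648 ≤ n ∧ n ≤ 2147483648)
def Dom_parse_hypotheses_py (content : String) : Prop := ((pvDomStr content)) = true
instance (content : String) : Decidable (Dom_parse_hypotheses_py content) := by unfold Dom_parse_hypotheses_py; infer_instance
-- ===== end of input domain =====

-- B replaces A's stateful line-by-line accumulator with a stateless pipeline (header
-- positions via enumerate, zipped into bounds, rendered by slicing); same return value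
-- everywhere; objective: alternative decomposition (no speed claim).

-- ===== PORT A =====
-- A's inline header test: stripped.lower().startswith("hypothesis") or (stripped[0].isdigit() and ":" in stripped[:10])
def pvHeaderCondA (stripped : String) : Bool :=
  PySem.Str.startswith (PySem.Str.lower stripped) "hypothesis" ||
    ((match PySem.Str.pyGet? stripped 0 with
      | some c => PySem.Chars.isdigit c
      | none => false) &&
     PySem.Str.isIn ":" (PySem.Str.slice stripped none (some 10)))

-- A's loop body: state = (hypotheses, current_hypothesis, current_text); dicts as PySem.Dict
def pvStepA (st : List (PySem.Dict String String) × PySem.Dict String String × List String)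
    (line : String) : List (PySem.Dict String String) × PySem.Dict String String × List String :=
  let stripped := PySem.Str.strip line
  if stripped != "" && pvHeaderCondA stripped then
    if st.2.2 != ([] : List String) then
      let cur2 := st.2.1.insert "description" (PySem.Str.join " " st.2.2)
      let hyps2 := if ((cur2.get? "title").getD "") != "" then st.1 ++ [cur2] else st.1
      (hyps2, (PySem.Dict.empty : PySem.Dict String String).insert "title" stripped, [])
    else
      (st.1, (PySem.Dict.empty : PySem.Dict String String).insert "title" stripped, [])
  else if stripped != "" then
    (st.1, st.2.1, st.2.2 ++ [stripped])
  else
    (st.1, st.2.1, st.2.2)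

def parse_hypotheses_py (content : String) : List (List (String × String)) :=
  let st := ((PySem.Str.split? content "\n").getD []).foldl pvStepA
    ([], (PySem.Dict.empty : PySem.Dict String String), [])
  let hyps :=
    if st.2.2 != ([] : List String) then
      let cur2 := st.2.1.insert "description" (PySem.Str.join " " st.2.2)
      if ((cur2.get? "title").getD "") != "" then st.1 ++ [cur2] else st.1
    else st.1
  if hyps != [] then hyps.map (fun d => PySem.Dict.items d)
  else [[("title", "Research Hypothesis"), ("description", PySem.Str.strip content)]]

-- ===== PORT B =====
-- B's helper _is_header (only ever applied to nonempty stripped lines)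
def pvIsHeader (s : String) : Bool :=
  PySem.Str.startswith (PySem.Str.lower s) "hypothesis" ||
    ((match PySem.Str.pyGet? s 0 with
      | some c => PySem.Chars.isdigit c
      | none => false) &&
     PySem.Str.isIn ":" (PySem.Str.slice s none (some 10)))

-- Source B: lines, header positions (enumerate), consecutive bounds (zip), slice comprehension
def parse_hypotheses_py_alt (content : String) : List (List (String × String)) :=
  let lines := (((PySem.Str.split? content "\n").getD []).map PySem.Str.strip).filter
    (fun s => s != "")
  let idxs : List Int := ((PySem.List.enumerate lines 0).filter
    (fun p => pvIsHeader p.2)).map (fun p => p.1)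
  let bounds := idxs.zip (idxs.drop 1 ++ [(lines.length : Int)])
  let result := (bounds.filter (fun p => decide (p.1 + 1 < p.2))).map
    (fun p => [("title", PySem.List.pyGetD lines p.1 ""),
               ("description", PySem.Str.join " " (PySem.List.slice lines (some (p.1 + 1)) (some p.2)))])
  if result != [] then result
  else [[("title", "Research Hypothesis"), ("description", PySem.Str.strip content)]]

-- ===== PRECONDITION & SPEC =====
def Spec_parse_hypotheses_py (content : String) (out : List (List (String × String))) : Prop := out = parse_hypotheses_py_alt content
instance (content : String) (out : List (List (String × String))) : Decidable (Spec_parse_hypotheses_py content out) := by unfold Spec_parse_hypotheses_py; infer_instance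

-- ===== CLAIM (what is proved, stated in full; the proofs are below) =====
def Claim_equal_parse_hypotheses_py : Prop := ∀ (content : String), Dom_parse_hypotheses_py content → Spec_parse_hypotheses_py content (parse_hypotheses_py content)

-- ===== LEMMAS AND PROOFS =====

-- proof-internal intermediate: group the nonempty stripped lines into (header?, body) blocks
def pvStepB (st : List (Option String × List String) × Option String × List String)
    (s : String) : List (Option String × List String) × Option String × List String :=
  if pvIsHeader s then (st.1 ++ [(st.2.1, st.2.2)], some s, [])
  else (st.1, st.2.1, st.2.2 ++ [s])

-- rendering of a block list
def pvRender (blocks : List (Option String × List String)) : List (List (String × String)) :=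
  (blocks.filter (fun b => b.1.isSome && !b.2.isEmpty)).map
    (fun b => [("title", b.1.getD ""), ("description", PySem.Str.join " " b.2)])

-- the dict A's current_hypothesis holds, as a function of the current header
def pvOptDict (header : Option String) : PySem.Dict String String :=
  match header with
  | none => PySem.Dict.empty
  | some h => (PySem.Dict.empty : PySem.Dict String String).insert "title" h

-- invariant tying A's loop state to the block fold's
def pvInv (S : List (PySem.Dict String String) × PySem.Dict String String × List String)
    (T : List (Option String × List String) × Option String × List String) : Prop :=
  S.1.map (fun d => PySem.Dict.items d) = pvRender T.1 ∧
  S.2.1 = pvOptDict T.2.1 ∧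
  S.2.2 = T.2.2 ∧
  (∀ h, T.2.1 = some h → h ≠ "")

theorem pvIsHeader_eq_condA (s : String) : pvIsHeader s = pvHeaderCondA s := rfl

theorem pvStepA_empty (S : List (PySem.Dict String String) × PySem.Dict String String × List String)
    (l : String) (h : PySem.Str.strip l = "") : pvStepA S l = S := by
  simp [pvStepA, h]

theorem pvRender_append_one (bs : List (Option String × List String))
    (b : Option String × List String) :
    pvRender (bs ++ [b]) = pvRender bs ++
      (if (b.1.isSome && !b.2.isEmpty) = true then
        [[("title", b.1.getD ""), ("description", PySem.Str.join " " b.2)]] else []) := by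
  by_cases h : (b.1.isSome && !b.2.isEmpty) = true <;>
    simp [pvRender, List.filter_append, h]

-- A's closing of a block agrees with the rendering of that block
theorem pvClose_eq (hyps : List (PySem.Dict String String)) (header : Option String)
    (body : List String) (hh : ∀ h, header = some h → h ≠ "")
    (hb : body ≠ []) :
    (if ((((pvOptDict header).insert "description"
            (PySem.Str.join " " body)).get? "title").getD "") != "" then
        hyps ++ [(pvOptDict header).insert "description" (PySem.Str.join " " body)]
      else hyps).map (fun d => PySem.Dict.items d)
      = hyps.map (fun d => PySem.Dict.items d) ++
        (if (header.isSome && !body.isEmpty) = true then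
          [[("title", header.getD ""), ("description", PySem.Str.join " " body)]] else []) := by
  cases header with
  | none =>
    have hc : ((((pvOptDict none).insert "description"
        (PySem.Str.join " " body)).get? "title").getD "" != "") = false := rfl
    simp [hc]
  | some h =>
    have hne : h ≠ "" := hh h rfl
    have hgd : ((((pvOptDict (some h)).insert "description"
        (PySem.Str.join " " body)).get? "title").getD "") = h := rfl
    rw [hgd]
    have hcond : (h != "") = true := by simpa [bne] using hne
    have hitems : ((pvOptDict (some h)).insert "description"
        (PySem.Str.join " " body)).items = [("title", h), ("description", PySem.Str.join " " body)] := rfl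
    simp [hcond, hitems, hb]

theorem pvInv_step (S : List (PySem.Dict String String) × PySem.Dict String String × List String)
    (T : List (Option String × List String) × Option String × List String)
    (l : String) (hne : PySem.Str.strip l ≠ "") (hInv : pvInv S T) :
    pvInv (pvStepA S l) (pvStepB T (PySem.Str.strip l)) := by
  obtain ⟨h1, h2, h3, h4⟩ := hInv
  have hbne : (PySem.Str.strip l != "") = true := by simpa [bne] using hne
  simp only [pvStepA, pvStepB, pvIsHeader_eq_condA]
  by_cases hH : pvHeaderCondA (PySem.Str.strip l) = true
  · rw [if_pos (show (PySem.Str.strip l != "" && pvHeaderCondA (PySem.Str.strip l)) = true by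
        rw [hbne, hH]; rfl), if_pos hH]
    by_cases ht : S.2.2 = ([] : List String)
    · have htb : T.2.2 = [] := by rw [← h3]; exact ht
      rw [if_neg (by simp [ht])]
      refine ⟨?_, rfl, rfl, ?_⟩
      · rw [pvRender_append_one, if_neg (by simp [htb]), h1]
        simp
      · intro h hh
        injection hh with hh'
        subst hh'
        exact hne
    · have htT : T.2.2 ≠ [] := by rw [← h3]; exact ht
      rw [if_pos (by simpa [bne] using ht)]
      refine ⟨?_, rfl, rfl, ?_⟩
      · rw [pvRender_append_one, ← h1, h2, h3]
        exact pvClose_eq S.1 T.2.1 T.2.2 h4 htT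
      · intro h hh
        injection hh with hh'
        subst hh'
        exact hne
  · have hf : pvHeaderCondA (PySem.Str.strip l) = false := by simpa using hH
    simp only [hf, Bool.and_false, hbne, Bool.false_eq_true, if_false, if_true]
    refine ⟨h1, h2, ?_, h4⟩
    rw [h3]

theorem pvFold_inv (ls : List String)
    (S : List (PySem.Dict String String) × PySem.Dict String String × List String)
    (T : List (Option String × List String) × Option String × List String)
    (hInv : pvInv S T) :
    pvInv (ls.foldl pvStepA S)
      (((ls.map PySem.Str.strip).filter (fun s => s != "")).foldl pvStepB T) := by
  induction ls generalizing S T with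
  | nil => exact hInv
  | cons l ls ih =>
    by_cases h : PySem.Str.strip l = ""
    · rw [List.foldl_cons, pvStepA_empty S l h, List.map_cons, List.filter_cons]
      simp only [h]
      rw [if_neg (by simp)]
      exact ih S T hInv
    · rw [List.foldl_cons, List.map_cons, List.filter_cons,
        if_pos (by simpa [bne] using h), List.foldl_cons]
      exact ih _ _ (pvInv_step S T l h hInv)

-- the final assembly of A, for any pair of loop states tied by the invariant
theorem pvFinal_of_inv (S : List (PySem.Dict String String) × PySem.Dict String String × List String)
    (T : List (Option String × List String) × Option String × List String)
    (hInv : pvInv S T) (c : String) :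
    (if (if S.2.2 != ([] : List String) then
          (if (((S.2.1.insert "description" (PySem.Str.join " " S.2.2)).get? "title").getD "") != ""
            then S.1 ++ [S.2.1.insert "description" (PySem.Str.join " " S.2.2)] else S.1)
          else S.1) != [] then
        (if S.2.2 != ([] : List String) then
          (if (((S.2.1.insert "description" (PySem.Str.join " " S.2.2)).get? "title").getD "") != ""
            then S.1 ++ [S.2.1.insert "description" (PySem.Str.join " " S.2.2)] else S.1)
          else S.1).map (fun d => PySem.Dict.items d)
      else [[("title", "Research Hypothesis"), ("description", PySem.Str.strip c)]])
    = (if pvRender (T.1 ++ [(T.2.1, T.2.2)]) != [] then pvRender (T.1 ++ [(T.2.1, T.2.2)])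
      else [[("title", "Research Hypothesis"), ("description", PySem.Str.strip c)]]) := by
  obtain ⟨h1, h2, h3, h4⟩ := hInv
  have hfinal : (if S.2.2 != ([] : List String) then
        (if (((S.2.1.insert "description" (PySem.Str.join " " S.2.2)).get? "title").getD "") != ""
          then S.1 ++ [S.2.1.insert "description" (PySem.Str.join " " S.2.2)] else S.1)
        else S.1).map (fun d => PySem.Dict.items d) = pvRender (T.1 ++ [(T.2.1, T.2.2)]) := by
    by_cases ht : S.2.2 = ([] : List String)
    · have htb : T.2.2 = [] := by rw [← h3]; exact ht
      rw [if_neg (by simp [ht]), pvRender_append_one, if_neg (by simp [htb]), h1]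
      simp
    · have htT : T.2.2 ≠ [] := by rw [← h3]; exact ht
      rw [if_pos (by simpa [bne] using ht), pvRender_append_one, ← h1, h2, h3]
      exact pvClose_eq S.1 T.2.1 T.2.2 h4 htT
  rw [← hfinal]
  set AF := (if S.2.2 != ([] : List String) then
        (if (((S.2.1.insert "description" (PySem.Str.join " " S.2.2)).get? "title").getD "") != ""
          then S.1 ++ [S.2.1.insert "description" (PySem.Str.join " " S.2.2)] else S.1)
        else S.1) with hAF
  by_cases hE : AF = []
  · rw [if_neg (by simp only [hE]; decide), if_neg (by simp only [hE, List.map_nil]; decide)]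
  · have hmne : AF.map (fun d => PySem.Dict.items d) ≠ [] := by
      simpa [List.map_eq_nil_iff] using hE
    rw [if_pos (by simpa [bne] using hE), if_pos (by simpa [bne] using hmne)]

-- ===== index characterization of the block fold (B side) =====

-- Nat-valued header positions, offset by k
def pvIdxsAux (ls : List String) (k : Nat) : List Nat :=
  match ls with
  | [] => []
  | s :: t => (if pvIsHeader s then [k] else []) ++ pvIdxsAux t (k + 1)

def pvIdxsN (ls : List String) : List Nat := pvIdxsAux ls 0

def pvEntry (ls : List String) (i j : Nat) : List (String × String) :=
  [("title", ls.getD i ""), ("description", PySem.Str.join " " ((ls.drop (i + 1)).take (j - (i + 1))))]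

def pvPairRender (ls : List String) (ps : List (Nat × Nat)) : List (List (String × String)) :=
  (ps.filter (fun p => decide (p.1 + 1 < p.2))).map (fun p => pvEntry ls p.1 p.2)

theorem pvIdxsAux_bounds (ls : List String) (k : Nat) :
    ∀ i ∈ pvIdxsAux ls k, k ≤ i ∧ i < k + ls.length := by
  induction ls generalizing k with
  | nil => intro i hi; cases hi
  | cons s t ih =>
    intro i hi
    rw [pvIdxsAux, List.mem_append] at hi
    rcases hi with hi | hi
    · rcases Bool.eq_false_or_eq_true (pvIsHeader s) with h | h <;> simp [h] at hi
      subst hi; simp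
    · have := ih (k + 1) i hi
      constructor <;> [omega; (simp only [List.length_cons]; omega)]

theorem pvIdxsAux_append (ls : List String) (x : String) (k : Nat) :
    pvIdxsAux (ls ++ [x]) k = pvIdxsAux ls k ++ (if pvIsHeader x then [k + ls.length] else []) := by
  induction ls generalizing k with
  | nil => simp [pvIdxsAux]
  | cons s t ih =>
    simp only [List.cons_append, pvIdxsAux, ih (k + 1), List.length_cons, List.append_assoc]
    have : k + 1 + t.length = k + (t.length + 1) := by omega
    rw [this]

-- port's Int-valued positions are the casts of the Nat ones
theorem pvIdxs_enumerate (ls : List String) (k : Nat) :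
    ((PySem.List.enumerate ls (k : Int)).filter (fun p => pvIsHeader p.2)).map (fun p => p.1)
      = (pvIdxsAux ls k).map (fun n => Int.ofNat n) := by
  induction ls generalizing k with
  | nil => simp [PySem.List.enumerate_nil, pvIdxsAux]
  | cons s t ih =>
    rw [PySem.List.enumerate_cons, List.filter_cons]
    have hcast : (k : Int) + 1 = ((k + 1 : Nat) : Int) := by push_cast; ring
    rw [hcast, pvIdxsAux]
    rcases Bool.eq_false_or_eq_true (pvIsHeader s) with h | h
    · rw [if_pos (by simp [h]), List.map_cons, ih (k + 1)]
      simp [h]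
    · rw [if_neg (by simp [h]), ih (k + 1)]
      simp [h]

-- stability of entries under appending a line past both bounds
theorem pvEntry_append (ls : List String) (x : String) (i j : Nat)
    (hi : i < ls.length) (hj : j ≤ ls.length) :
    pvEntry (ls ++ [x]) i j = pvEntry ls i j := by
  unfold pvEntry
  have h1 : (ls ++ [x]).getD i "" = ls.getD i "" := by
    simp [List.getD, List.getElem?_append_left hi]
  have h2 : ((ls ++ [x]).drop (i + 1)).take (j - (i + 1))
      = (ls.drop (i + 1)).take (j - (i + 1)) := by
    rw [List.drop_append_of_le_length (by omega)]
    rw [List.take_append_of_le_length (by simp; omega)]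
  rw [h1, h2]

theorem pvPairRender_append (ls : List String) (x : String) (ps : List (Nat × Nat))
    (hps : ∀ p ∈ ps, p.1 < ls.length ∧ p.2 ≤ ls.length) :
    pvPairRender (ls ++ [x]) ps = pvPairRender ls ps := by
  unfold pvPairRender
  apply List.map_congr_left
  intro p hp
  have hm := hps p (List.mem_of_mem_filter hp)
  exact pvEntry_append ls x p.1 p.2 hm.1 hm.2

theorem pvPairRender_append_one (ls : List String) (ps : List (Nat × Nat)) (p : Nat × Nat) :
    pvPairRender ls (ps ++ [p]) = pvPairRender ls ps ++
      (if p.1 + 1 < p.2 then [pvEntry ls p.1 p.2] else []) := by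
  by_cases h : p.1 + 1 < p.2 <;> simp [pvPairRender, List.filter_append, h]

-- zip of consecutive elements after a snoc
theorem pvZip_succ_append (I : List Nat) (n : Nat) (hI : I ≠ []) :
    (I ++ [n]).zip ((I ++ [n]).drop 1) = I.zip (I.drop 1) ++ [(I.getLast hI, n)] := by
  induction I with
  | nil => exact absurd rfl hI
  | cons a t ih =>
    cases t with
    | nil => simp
    | cons b t' =>
      have h := ih (by simp)
      simp only [List.cons_append, List.drop_one, List.tail_cons] at h ⊢
      rw [List.zip_cons_cons, List.zip_cons_cons, h]
      simp [List.getLast]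

theorem pvZip_pad (I : List Nat) (n : Nat) :
    (I ++ [n]).zip ((I ++ [n]).drop 1) = I.zip (I.drop 1 ++ [n]) := by
  induction I with
  | nil => rfl
  | cons a t ih =>
    cases t with
    | nil => rfl
    | cons b t' =>
      simp only [List.cons_append, List.drop_one, List.tail_cons, List.zip_cons_cons] at ih ⊢
      rw [ih]

-- main characterization of the block fold by header positions (snoc induction)
theorem pvFoldB_char (ls : List String) :
    (ls.foldl pvStepB ([], none, [])).2.1
        = (pvIdxsN ls).getLast?.map (fun i => ls.getD i "") ∧
    (ls.foldl pvStepB ([], none, [])).2.2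
        = ls.drop (((pvIdxsN ls).getLast?.map (fun i => i + 1)).getD 0) ∧
    pvRender (ls.foldl pvStepB ([], none, [])).1
        = pvPairRender ls ((pvIdxsN ls).zip ((pvIdxsN ls).drop 1)) := by
  induction ls using List.reverseRecOn with
  | nil => exact ⟨rfl, rfl, rfl⟩
  | append_singleton ls x ih =>
    obtain ⟨q1, q2, q3⟩ := ih
    have hbounds : ∀ i ∈ pvIdxsN ls, i < ls.length := fun i hi => by
      have := pvIdxsAux_bounds ls 0 i hi; omega
    have hIdx : pvIdxsN (ls ++ [x])
        = pvIdxsN ls ++ (if pvIsHeader x then [ls.length] else []) := by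
      have := pvIdxsAux_append ls x 0
      simpa [pvIdxsN] using this
    have hpairs_mem : ∀ p ∈ (pvIdxsN ls).zip ((pvIdxsN ls).drop 1),
        p.1 < ls.length ∧ p.2 ≤ ls.length := by
      intro p hp
      have h1 := List.of_mem_zip hp
      have b1 := hbounds p.1 h1.1
      have b2 := hbounds p.2 (List.mem_of_mem_drop h1.2)
      constructor <;> omega
    rw [List.foldl_append, List.foldl_cons, List.foldl_nil]
    rcases Bool.eq_false_or_eq_true (pvIsHeader x) with hx | hx
    · -- x is a header: the current block closes and index ls.length is appended
      have hstep : pvStepB (ls.foldl pvStepB ([], none, [])) x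
          = ((ls.foldl pvStepB ([], none, [])).1 ++
              [((ls.foldl pvStepB ([], none, [])).2.1, (ls.foldl pvStepB ([], none, [])).2.2)],
             some x, []) := by
        simp [pvStepB, hx]
      rw [hstep, hIdx]
      simp only [hx, if_pos]
      have hlast : (pvIdxsN ls ++ [ls.length]).getLast? = some ls.length := by
        simp
      refine ⟨?_, ?_, ?_⟩
      · rw [hlast]
        simp [List.getD]
      · rw [hlast]
        simp
      · rw [pvRender_append_one, q1, q2, q3]
        rcases (pvIdxsN ls).eq_nil_or_concat' with hnil | ⟨J, l, hJ⟩
        · rw [hnil]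
          simp only [List.nil_append, List.getLast?_nil, Option.map_none, Option.getD_none]
          have : pvPairRender (ls ++ [x]) ([ls.length].zip ([ls.length].drop 1)) = [] := rfl
          rw [this]
          simp [pvPairRender]
        · have hne : pvIdxsN ls ≠ [] := by rw [hJ]; simp
          have hlast' : (pvIdxsN ls).getLast? = some ((pvIdxsN ls).getLast hne) := by
            rw [List.getLast?_eq_getLast]
          have hl : (pvIdxsN ls).getLast hne < ls.length :=
            hbounds _ (List.getLast_mem hne)
          rw [hlast']
          simp only [Option.map_some, Option.getD_some, Option.isSome_some, Bool.true_and]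
          rw [pvZip_succ_append (pvIdxsN ls) ls.length hne,
            pvPairRender_append_one, pvPairRender_append ls x _ hpairs_mem]
          set i := (pvIdxsN ls).getLast hne with hi_def
          have hdrop_ne : (ls.drop (i + 1) ≠ []) ↔ (i + 1 < ls.length) := by
            rw [← List.length_pos_iff, List.length_drop]; omega
          by_cases hc : i + 1 < ls.length
          · have hb : ls.drop (i + 1) ≠ [] := hdrop_ne.mpr hc
            rw [if_pos (by simp [hb]), if_pos hc]
            congr 1
            unfold pvEntry
            have ht : (ls ++ [x]).getD i "" = ls.getD i "" := by
              simp [List.getD, List.getElem?_append_left hl]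
            have hd : ((ls ++ [x]).drop (i + 1)).take (ls.length - (i + 1)) = ls.drop (i + 1) := by
              rw [List.drop_append_of_le_length (by omega),
                List.take_append_of_le_length (by simp)]
              simp
            rw [ht, hd]
          · have hb : ls.drop (i + 1) = [] := by
              rw [← List.length_eq_zero_iff, List.length_drop]; omega
            rw [if_neg (by simp [hb]), if_neg hc]
    · -- x is not a header: it joins the current body
      have hstep : pvStepB (ls.foldl pvStepB ([], none, [])) x
          = ((ls.foldl pvStepB ([], none, [])).1,
             (ls.foldl pvStepB ([], none, [])).2.1,
             (ls.foldl pvStepB ([], none, [])).2.2 ++ [x]) := by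
        simp [pvStepB, hx]
      rw [hstep, hIdx]
      simp only [hx, Bool.false_eq_true, if_false, List.append_nil]
      refine ⟨?_, ?_, ?_⟩
      · rw [q1]
        cases hL : (pvIdxsN ls).getLast? with
        | none => rfl
        | some i =>
          have hi : i < ls.length := hbounds i (List.mem_of_getLast? hL)
          simp [List.getD, List.getElem?_append_left hi]
      · rw [q2]
        cases hL : (pvIdxsN ls).getLast? with
        | none => simp
        | some i =>
          have hi : i < ls.length := hbounds i (List.mem_of_getLast? hL)
          simp only [Option.map_some, Option.getD_some]
          rw [List.drop_append_of_le_length (by omega)]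
      · rw [q3, pvPairRender_append ls x _ hpairs_mem]

-- full result equality: A's rendered blocks are B's sliced bounds
theorem pvBlocks_eq_idx (ls : List String) :
    pvRender ((ls.foldl pvStepB ([], none, [])).1 ++
        [((ls.foldl pvStepB ([], none, [])).2.1, (ls.foldl pvStepB ([], none, [])).2.2)])
      = pvPairRender ls ((pvIdxsN ls).zip ((pvIdxsN ls).drop 1 ++ [ls.length])) := by
  obtain ⟨q1, q2, q3⟩ := pvFoldB_char ls
  have hbounds : ∀ i ∈ pvIdxsN ls, i < ls.length := fun i hi => by
    have := pvIdxsAux_bounds ls 0 i hi; omega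
  rw [pvRender_append_one, q1, q2, q3]
  rcases (pvIdxsN ls).eq_nil_or_concat' with hnil | ⟨J, l, hJ⟩
  · rw [hnil]
    simp [pvPairRender]
  · have hne : pvIdxsN ls ≠ [] := by rw [hJ]; simp
    have hlast' : (pvIdxsN ls).getLast? = some ((pvIdxsN ls).getLast hne) := by
      rw [List.getLast?_eq_getLast]
    have hl : (pvIdxsN ls).getLast hne < ls.length := hbounds _ (List.getLast_mem hne)
    -- zip with [len] appended equals zip of consecutive ++ final pair
    have hzip : (pvIdxsN ls).zip ((pvIdxsN ls).drop 1 ++ [ls.length])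
        = (pvIdxsN ls).zip ((pvIdxsN ls).drop 1) ++ [((pvIdxsN ls).getLast hne, ls.length)] := by
      rw [← pvZip_pad, pvZip_succ_append (pvIdxsN ls) ls.length hne]
    rw [hzip, pvPairRender_append_one, hlast']
    set i := (pvIdxsN ls).getLast hne with hi_def
    simp only [Option.map_some, Option.getD_some, Option.isSome_some, Bool.true_and]
    have hdrop_ne : (ls.drop (i + 1) ≠ []) ↔ (i + 1 < ls.length) := by
      rw [← List.length_pos_iff, List.length_drop]; omega
    by_cases hcnd : i + 1 < ls.length
    · have hb : ls.drop (i + 1) ≠ [] := hdrop_ne.mpr hcnd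
      rw [if_pos (by simp [hb]), if_pos hcnd]
      congr 1
      unfold pvEntry
      rw [List.take_of_length_le (by simp)]
    · have hb : ls.drop (i + 1) = [] := by
        rw [← List.length_eq_zero_iff, List.length_drop]; omega
      rw [if_neg (by simp [hb]), if_neg hcnd]

-- port B's result list equals the Nat-side pair rendering
theorem pvAltResult_eq (ls : List String) :
    (((((PySem.List.enumerate ls 0).filter (fun p => pvIsHeader p.2)).map (fun p => p.1)).zip
        ((((PySem.List.enumerate ls 0).filter (fun p => pvIsHeader p.2)).map (fun p => p.1)).drop 1
          ++ [(ls.length : Int)])).filter (fun p => decide (p.1 + 1 < p.2))).map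
      (fun p => [("title", PySem.List.pyGetD ls p.1 ""),
                 ("description", PySem.Str.join " " (PySem.List.slice ls (some (p.1 + 1)) (some p.2)))])
      = pvPairRender ls ((pvIdxsN ls).zip ((pvIdxsN ls).drop 1 ++ [ls.length])) := by
  have h0 : ((PySem.List.enumerate ls 0).filter (fun p => pvIsHeader p.2)).map (fun p => p.1)
      = (pvIdxsN ls).map (fun n => Int.ofNat n) := by
    have h := pvIdxs_enumerate ls 0
    rw [Nat.cast_zero] at h
    exact h
  rw [h0]
  have hdrop : ((pvIdxsN ls).map (fun n => Int.ofNat n)).drop 1 ++ [(ls.length : Int)]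
      = ((pvIdxsN ls).drop 1 ++ [ls.length]).map (fun n => Int.ofNat n) := by
    rw [List.map_append, List.map_drop]
    rfl
  rw [hdrop, List.zip_map, List.filter_map, List.map_map]
  unfold pvPairRender
  have hfeq : ((fun (p : Int × Int) => decide (p.1 + 1 < p.2)) ∘
      Prod.map (fun n : Nat => Int.ofNat n) (fun n : Nat => Int.ofNat n))
      = (fun p : Nat × Nat => decide (p.1 + 1 < p.2)) := by
    funext p
    rcases p with ⟨i, j⟩
    simp only [Function.comp_apply, Prod.map_apply, Int.ofNat_eq_natCast, decide_eq_decide]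
    constructor <;> intro h <;> exact_mod_cast h
  rw [hfeq]
  apply List.map_congr_left
  intro p _
  rcases p with ⟨i, j⟩
  simp only [Function.comp_apply, Prod.map_apply, Int.ofNat_eq_natCast]
  unfold pvEntry
  have hget : PySem.List.pyGetD ls ((i : Nat) : Int) "" = ls.getD i "" :=
    PySem.List.pyGetD_natCast ls i ""
  have hcast : ((i : Int) + 1) = (((i + 1 : Nat)) : Int) := by push_cast; ring
  have hslice : PySem.List.slice ls (some ((i : Int) + 1)) (some (j : Int))
      = (ls.drop (i + 1)).take (j - (i + 1)) := by
    rw [hcast]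
    exact PySem.List.slice_natCast ls (i + 1) j
  rw [hget, hslice]

-- ===== VERDICT (by name: the statement is the Claim_ definition above) =====
theorem parse_hypotheses_py_spec : Claim_equal_parse_hypotheses_py := by
  intro content _
  unfold Spec_parse_hypotheses_py parse_hypotheses_py parse_hypotheses_py_alt
  have hinv := pvFold_inv ((PySem.Str.split? content "\n").getD [])
      ([], (PySem.Dict.empty : PySem.Dict String String), []) ([], none, [])
      ⟨rfl, rfl, rfl, fun h hh => by cases hh⟩
  have hfin := pvFinal_of_inv _ _ hinv content
  rw [hfin]
  set ls := (((PySem.Str.split? content "\n").getD []).map PySem.Str.strip).filter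
    (fun s => s != "") with hls
  rw [show ((ls.foldl pvStepB ([], none, [])).1 ++
      [((ls.foldl pvStepB ([], none, [])).2.1, (ls.foldl pvStepB ([], none, [])).2.2)])
      = ((ls.foldl pvStepB ([], none, [])).1 ++
      [((ls.foldl pvStepB ([], none, [])).2.1, (ls.foldl pvStepB ([], none, [])).2.2)]) from rfl]
  rw [pvBlocks_eq_idx ls, ← pvAltResult_eq ls]
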